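-- pv_equiv track=rewrite | github.com/Barret-ma/leetcode | 85. Maximal Rectangle.py | buildRectangles
-- ===== SOURCE A (Python) =====
-- def buildRectangles(grid, bottom):
--     heights = []
--     n = len(grid[0])
--
--     for i in range(n):
--         j = bottom
--         height = 0
--         while j >= 0:
--             if grid[j][i] == '0':
--                 break
--             else:
--                 height += int(grid[j][i])
--             j -= 1
--         heights.append(height)
--     return heights
-- ===== SOURCE B (Python) =====
-- def buildRectangles(grid, bottom):
--     n = len(grid[0])
--     if n == 0:
--         return []
--     heights = [0] * n
--     stopped = [False] * n
--     for j in range(bottom, -1, -1):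
--         for i in range(n):
--             if not stopped[i]:
--                 v = grid[j][i]
--                 if v == '0':
--                     stopped[i] = True
--                 else:
--                     heights[i] += int(v)
--     return heights
-- ===== Notes on version B (the rewrite author's own statement) =====
-- stated objective: alternative
-- what changed: Replaces A's per-column downward while-loop (with break) by a single bottom-up row-major pass maintaining a heights array and a parallel stopped boolean mask.
import Mathlib
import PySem

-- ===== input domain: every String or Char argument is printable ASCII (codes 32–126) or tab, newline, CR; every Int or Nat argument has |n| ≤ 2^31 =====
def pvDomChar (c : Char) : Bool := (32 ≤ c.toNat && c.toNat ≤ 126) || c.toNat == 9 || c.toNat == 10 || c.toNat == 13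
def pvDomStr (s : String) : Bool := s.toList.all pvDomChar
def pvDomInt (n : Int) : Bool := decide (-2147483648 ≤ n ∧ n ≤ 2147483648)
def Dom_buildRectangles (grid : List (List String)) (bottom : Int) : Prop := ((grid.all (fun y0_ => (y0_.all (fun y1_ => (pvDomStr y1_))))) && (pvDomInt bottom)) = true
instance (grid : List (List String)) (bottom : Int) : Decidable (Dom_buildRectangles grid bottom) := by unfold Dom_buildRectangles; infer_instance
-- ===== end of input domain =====

-- B replaces A's per-column downward scan (while-loop with break) by a single bottom-up
-- row-major pass maintaining a heights array and a parallel stopped mask (objective: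
-- alternative decomposition, same cost).

-- ===== PORT A =====
-- the 'while j >= 0' loop of A; fuel bounds the iteration count (bottom.toNat + 1 at the call site)
def buildRectanglesLoop (grid : List (List String)) (i : Int) : Nat → Int → Int → Int
  | 0, _, height => height
  | fuel+1, j, height =>
    if 0 ≤ j then
      let cell := PySem.List.pyGetD (PySem.List.pyGetD grid j []) i ""
      if cell = "0" then height
      else buildRectanglesLoop grid i fuel (j - 1) (height + (PySem.Int.ofStr? cell).getD 0)
    else height

def buildRectangles (grid : List (List String)) (bottom : Int) : List Int :=
  let n := (PySem.List.pyGetD grid 0 []).length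
  (PySem.List.pyRange 0 (n : Int) 1).map (fun i => buildRectanglesLoop grid i (bottom.toNat + 1) bottom 0)

-- ===== PORT B =====
-- one column step of B's inner 'for i in range(n)' loop over the state (heights, stopped);
-- v = grid[j][i] is fetched here, exactly as in Source B
def buildRectanglesInner (grid : List (List String)) (j : Int) (st : List Int × List Bool) (i : Int) : List Int × List Bool :=
  if PySem.List.pyGetD st.2 i false then st
  else
    let v := PySem.List.pyGetD (PySem.List.pyGetD grid j []) i ""
    if v = "0" then (st.1, PySem.List.pySetD st.2 i true)
    else (PySem.List.pySetD st.1 i (PySem.List.pyGetD st.1 i 0 + (PySem.Int.ofStr? v).getD 0), st.2)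

def buildRectangles_alt (grid : List (List String)) (bottom : Int) : List Int :=
  let n := (PySem.List.pyGetD grid 0 []).length
  if n = 0 then [] else
  let st := (PySem.List.pyRange bottom (-1) (-1)).foldl
    (fun st j => (PySem.List.pyRange 0 (n : Int) 1).foldl (buildRectanglesInner grid j) st)
    (List.replicate n 0, List.replicate n false)
  st.1

-- ===== PRECONDITION & SPEC =====
-- a cell A may touch without raising: row in range, column in range, and the string is "0" or parses as an int
def pvCellOK (grid : List (List String)) (j i : Nat) : Bool :=
  decide (j < grid.length) && decide (i < (grid.getD j []).length) &&
    ((grid.getD j []).getD i "" == "0" || (PySem.Int.ofStr? ((grid.getD j []).getD i "")).isSome)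
-- a cell at which A's column scan continues downward past it
def pvCellCont (grid : List (List String)) (j i : Nat) : Bool :=
  pvCellOK grid j i && !((grid.getD j []).getD i "" == "0")
-- Pre_ is exactly the inputs on which the Python A returns: the grid is nonempty, and (when the
-- first row is nonempty and 0 <= bottom) row 'bottom' exists and every cell the per-column scan
-- from row 'bottom' downward actually reaches (all cells above it in its column continue the
-- scan) is in range and is "0" or an int literal; the row range is written clamped by
-- grid.length (equivalent, since bottom < grid.length) so deciding Pre_ stays cheap.
def Pre_buildRectangles (grid : List (List String)) (bottom : Int) : Prop :=
  grid ≠ [] ∧ (0 ≤ bottom → (grid.headD []).length ≠ 0 →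
    bottom < (grid.length : Int) ∧
    ∀ i ∈ List.range (grid.headD []).length,
      ∀ j ∈ List.range (min (bottom.toNat + 1) grid.length),
        (∀ j' ∈ List.range (min (bottom.toNat + 1) grid.length), j < j' → pvCellCont grid j' i = true) →
        pvCellOK grid j i = true)
instance (grid : List (List String)) (bottom : Int) : Decidable (Pre_buildRectangles grid bottom) := by
  unfold Pre_buildRectangles; infer_instance

def pvWitness_buildRectangles : List (List String) × Int := ([["1", "0"], ["2", "3"]], 1)

def Spec_buildRectangles (grid : List (List String)) (bottom : Int) (out : List Int) : Prop := out = buildRectangles_alt grid bottom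
instance (grid : List (List String)) (bottom : Int) (out : List Int) : Decidable (Spec_buildRectangles grid bottom out) := by unfold Spec_buildRectangles; infer_instance

-- ===== CLAIM (what is proved, stated in full; the proofs are below) =====
def Claim_equal_buildRectangles : Prop := ∀ (grid : List (List String)) (bottom : Int), Dom_buildRectangles grid bottom → Pre_buildRectangles grid bottom → Spec_buildRectangles grid bottom (buildRectangles grid bottom)

-- ===== LEMMAS AND PROOFS =====

-- the step B performs on the single column i of the state, seen as a (height, stopped) pair
def colstep (row : List String) (i : Int) (p : Int × Bool) : Int × Bool :=
  if p.2 then p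
  else if PySem.List.pyGetD row i "" = "0" then (p.1, true)
  else (p.1 + (PySem.Int.ofStr? (PySem.List.pyGetD row i "")).getD 0, false)

-- column i's evolution over a list of row indices
def colFold (grid : List (List String)) (i : Int) (L : List Int) (p : Int × Bool) : Int × Bool :=
  L.foldl (fun p j => colstep (PySem.List.pyGetD grid j []) i p) p

def proj (st : List Int × List Bool) (k : Nat) : Int × Bool := (st.1.getD k 0, st.2.getD k false)

theorem inner_lengths (grid : List (List String)) (j : Int) (l : List Int) (st : List Int × List Bool) :
    (l.foldl (buildRectanglesInner grid j) st).1.length = st.1.length ∧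
    (l.foldl (buildRectanglesInner grid j) st).2.length = st.2.length := by
  induction l generalizing st with
  | nil => exact ⟨rfl, rfl⟩
  | cons i l ih =>
    simp only [List.foldl_cons]
    have h := ih (buildRectanglesInner grid j st i)
    have e1 : (buildRectanglesInner grid j st i).1.length = st.1.length := by
      unfold buildRectanglesInner; dsimp only; split_ifs <;> simp [PySem.List.length_pySetD]
    have e2 : (buildRectanglesInner grid j st i).2.length = st.2.length := by
      unfold buildRectanglesInner; dsimp only; split_ifs <;> simp [PySem.List.length_pySetD]
    exact ⟨h.1.trans e1, h.2.trans e2⟩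

theorem proj_inner_other (grid : List (List String)) (j : Int) (st : List Int × List Bool) (m k : Nat) (h : m ≠ k) :
    proj (buildRectanglesInner grid j st (m : Int)) k = proj st k := by
  unfold buildRectanglesInner proj
  dsimp only
  split_ifs <;> simp [PySem.List.pySetD_natCast, List.getD, List.getElem?_set_ne h]

theorem proj_inner_self (grid : List (List String)) (j : Int) (st : List Int × List Bool) (m : Nat)
    (h1 : m < st.1.length) (h2 : m < st.2.length) :
    proj (buildRectanglesInner grid j st (m : Int)) m =
      colstep (PySem.List.pyGetD grid j []) (m : Int) (proj st m) := by
  unfold buildRectanglesInner colstep proj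
  dsimp only
  simp only [PySem.List.pyGetD_natCast, PySem.List.pySetD_natCast]
  split_ifs <;> simp_all [List.getD]

theorem fold_proj (grid : List (List String)) (j : Int) (N : Nat) (st : List Int × List Bool)
    (hl1 : st.1.length = N) (hl2 : st.2.length = N) :
    ∀ (M : Nat), M ≤ N → ∀ (k : Nat),
    proj (((List.range M).map (fun x : Nat => (x : Int))).foldl (buildRectanglesInner grid j) st) k =
      if k < M then colstep (PySem.List.pyGetD grid j []) (k : Int) (proj st k) else proj st k := by
  intro M
  induction M with
  | zero => intro _ k; simp
  | succ M ih =>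
    intro hM k
    rw [List.range_succ, List.map_append, List.foldl_append]
    simp only [List.map_cons, List.map_nil, List.foldl_cons, List.foldl_nil]
    have hlen := inner_lengths grid j ((List.range M).map (fun x : Nat => (x : Int))) st
    by_cases hkM : k = M
    · subst hkM
      rw [proj_inner_self grid j _ k (by rw [hlen.1, hl1]; omega) (by rw [hlen.2, hl2]; omega)]
      rw [ih (by omega) k]
      simp
    · rw [proj_inner_other grid j _ M k (fun e => hkM e.symm)]
      rw [ih (by omega) k]
      by_cases h2 : k < M
      · simp [h2, Nat.lt_succ_of_lt h2]
      · have h3 : ¬ k < M + 1 := by omega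
        simp [h2, h3]

theorem outer_proj (grid : List (List String)) (N : Nat) (L : List Int)
    (st : List Int × List Bool) (hl1 : st.1.length = N) (hl2 : st.2.length = N) (k : Nat) (hk : k < N) :
    proj (L.foldl (fun st j => (PySem.List.pyRange 0 (N : Int) 1).foldl
        (buildRectanglesInner grid j) st) st) k =
      colFold grid (k : Int) L (proj st k) := by
  induction L generalizing st with
  | nil => rfl
  | cons j L ih =>
    simp only [List.foldl_cons]
    simp only [PySem.List.pyRange_zero_nat] at ih ⊢
    have hlen := inner_lengths grid j ((List.range N).map (fun x : Nat => (x : Int))) st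
    rw [ih _ (hlen.1.trans hl1) (hlen.2.trans hl2)]
    rw [fold_proj grid j N st hl1 hl2 N (le_refl N) k]
    simp [hk, colFold]

theorem colFold_stopped (grid : List (List String)) (i : Int) (L : List Int) (h : Int) :
    colFold grid i L (h, true) = (h, true) := by
  induction L generalizing h with
  | nil => rfl
  | cons j L ih => simpa [colFold, colstep] using ih h

theorem loop_eq_colFold (grid : List (List String)) (i : Int) (fuel : Nat) (j h : Int)
    (hj : j < (fuel : Int)) :
    buildRectanglesLoop grid i fuel j h =
      (colFold grid i (PySem.List.pyRange j (-1) (-1)) (h, false)).1 := by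
  induction fuel generalizing j h with
  | zero =>
    rw [PySem.List.pyRange_neg_one_eq_nil (by omega : j ≤ -1)]
    rfl
  | succ fuel ih =>
    by_cases hj0 : 0 ≤ j
    · rw [PySem.List.pyRange_neg_one_cons (by omega : (-1:Int) < j)]
      simp only [buildRectanglesLoop, if_pos hj0, colFold, List.foldl_cons]
      by_cases hz : PySem.List.pyGetD (PySem.List.pyGetD grid j []) i "" = "0"
      · rw [if_pos hz]
        have : colstep (PySem.List.pyGetD grid j []) i (h, false) = (h, true) := by
          simp [colstep, hz]
        rw [this]
        have := colFold_stopped grid i (PySem.List.pyRange (j-1) (-1) (-1)) h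
        simp only [colFold] at this
        rw [this]
      · rw [if_neg hz]
        have hrec := ih (j - 1) (h + (PySem.Int.ofStr? (PySem.List.pyGetD (PySem.List.pyGetD grid j []) i "")).getD 0)
          (by push_cast at hj ⊢; omega)
        rw [hrec]
        have : colstep (PySem.List.pyGetD grid j []) i (h, false) =
            (h + (PySem.Int.ofStr? (PySem.List.pyGetD (PySem.List.pyGetD grid j []) i "")).getD 0, false) := by
          simp [colstep, hz]
        simp only [colFold] at *
        rw [this]
    · rw [PySem.List.pyRange_neg_one_eq_nil (by omega : j ≤ -1)]
      simp only [buildRectanglesLoop, if_neg hj0]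
      rfl

theorem outer_lengths (grid : List (List String)) (N : Nat) (L : List Int)
    (st : List Int × List Bool) :
    (L.foldl (fun st j => (PySem.List.pyRange 0 (N : Int) 1).foldl
        (buildRectanglesInner grid j) st) st).1.length = st.1.length ∧
    (L.foldl (fun st j => (PySem.List.pyRange 0 (N : Int) 1).foldl
        (buildRectanglesInner grid j) st) st).2.length = st.2.length := by
  induction L generalizing st with
  | nil => exact ⟨rfl, rfl⟩
  | cons j L ih =>
    simp only [List.foldl_cons]
    have h1 := inner_lengths grid j (PySem.List.pyRange 0 (N : Int) 1) st
    have h2 := ih ((PySem.List.pyRange 0 (N : Int) 1).foldl (buildRectanglesInner grid j) st)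
    exact ⟨h2.1.trans h1.1, h2.2.trans h1.2⟩

-- ===== VERDICT (by name: the statement is the Claim_ definition above) =====
theorem buildRectangles_spec : Claim_equal_buildRectangles := by
  intro grid bottom _ _
  unfold Spec_buildRectangles buildRectangles buildRectangles_alt
  dsimp only
  by_cases hn0 : (PySem.List.pyGetD grid 0 []).length = 0
  · simp [hn0]
  rw [if_neg hn0]
  set n := (PySem.List.pyGetD grid 0 []).length with hn
  set R := PySem.List.pyRange bottom (-1) (-1) with hR
  set st0 : List Int × List Bool := (List.replicate n 0, List.replicate n false) with hst0
  have hlens := outer_lengths grid n R st0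
  apply List.ext_getElem
  · rw [hlens.1]
    simp [hst0, PySem.List.length_pyRange_one]
  · intro k hk1 hk2
    have hkn : k < n := by
      simpa [PySem.List.length_pyRange_one] using hk1
    simp only [List.getElem_map, PySem.List.getElem_pyRange_one]
    have hget : (0 : Int) + (k : Int) = (k : Int) := by omega
    rw [hget]
    rw [loop_eq_colFold grid (k : Int) (bottom.toNat + 1) bottom 0 (by omega)]
    have hproj := outer_proj grid n R st0 (by simp [hst0]) (by simp [hst0]) k hkn
    have hp0 : proj st0 k = (0, false) := by simp [proj, hst0, List.getD]
    rw [hp0] at hproj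
    have : (List.foldl (fun st j => (PySem.List.pyRange 0 (n : Int) 1).foldl
        (buildRectanglesInner grid j) st) st0 R).1.getD k 0 =
        (colFold grid (k : Int) R (0, false)).1 := congrArg Prod.fst hproj
    rw [← this]
    rw [List.getD_eq_getElem _ _ (by rw [hlens.1]; simpa [hst0] using hkn)]
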